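-- pv_equiv track=rewrite | github.com/lumirevel/baekjoon | baek27231.py | splitMulList
-- ===== SOURCE A (Python) =====
-- def splitMulList(n):
--     num = n
--     sum = 0
--     binary = True
--     digitStack = []
--     multiply = []
--     while num != 0:
--         digit = num % 10
--         digitStack.append(digit)
--         multiply.append(digit)
--         sum += digit
--         if digit != 0 and digit != 1:
--             binary = False
--         num //= 10
--     results = [sum]
--
--     if not binary:
--         while not results or results[-1] < n:
--             results.append(0)
--             for i, digit in enumerate(digitStack):
--                 multiply[i] *= digit
--                 results[-1] += multiply[i]
--
--         if results[-1] > n: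
--             results.pop()
--         return digitStack, results
--     else:
--         return digitStack, [-1]
-- ===== SOURCE B (Python) =====
-- def _digits(num):
--     # least-significant digit first, by recursion
--     if num == 0:
--         return []
--     return [num % 10] + _digits(num // 10)
--
--
-- def splitMulList(n):
--     digits = _digits(n)
--     if all(d <= 1 for d in digits):
--         return digits, [-1]
--     results = []
--     j = 1
--     while True:
--         s = sum(d ** j for d in digits)
--         if s > n:
--             break
--         results.append(s)
--         if s == n:
--             break
--         j += 1
--     return digits, results
-- ===== Notes on version B (the rewrite author's own statement) =====
-- stated objective: simpler
-- what changed: B drops A's incrementally maintained multiply[] accumulator and its append-zero/accumulate/pop-at-the-end protocol: it extracts the digits by a small recursion, bails out with [-1] via a plain all(d <= 1) test, and then computes each term directly as sum(d**j), appending it only when it does not exceed n.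
import Mathlib
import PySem

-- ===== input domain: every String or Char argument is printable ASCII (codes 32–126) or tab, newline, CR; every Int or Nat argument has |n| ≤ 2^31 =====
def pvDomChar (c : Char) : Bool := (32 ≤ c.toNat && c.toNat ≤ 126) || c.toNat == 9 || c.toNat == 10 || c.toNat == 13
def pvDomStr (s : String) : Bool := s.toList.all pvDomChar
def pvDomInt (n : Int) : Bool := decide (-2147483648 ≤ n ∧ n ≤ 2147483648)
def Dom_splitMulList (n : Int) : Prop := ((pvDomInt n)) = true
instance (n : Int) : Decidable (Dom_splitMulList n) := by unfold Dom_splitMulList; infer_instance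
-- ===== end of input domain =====

-- B replaces A's incrementally maintained multiply[] accumulator and append-zero/accumulate/pop
-- protocol with a recursive digit extraction, a plain all(d ≤ 1) guard, and direct per-term
-- exponentiation appended only while the term does not exceed n (objective: simpler).

-- ===== PORT A =====
-- A's digit-extraction while loop; fuel makes the recursion total (one unit per iteration;
-- within Pre_ at most 10 digits, so fuel 64 is never exhausted).
def aDigitLoop (fuel : Nat) (num sum : Int) (binary : Bool) (digitStack multiply : List Int) :
    Int × Bool × List Int × List Int :=
  match fuel with
  | 0 => (sum, binary, digitStack, multiply)
  | f + 1 =>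
    if num ≠ 0 then
      let digit := PySem.Int.mod num 10
      aDigitLoop f (PySem.Int.floordiv num 10) (sum + digit)
        (if digit ≠ 0 ∧ digit ≠ 1 then false else binary)
        (digitStack ++ [digit]) (multiply ++ [digit])
    else (sum, binary, digitStack, multiply)

-- the inner for loop: multiply[i] *= digitStack[i] and accumulate into results[-1];
-- multiply and digitStack always have equal length, so the indexed loop is ported as a
-- paired walk returning the updated multiply list and the total added to results[-1]
def aInner : List Int → List Int → List Int × Int
  | m :: ms, d :: ds =>
      let m2 := m * d
      let (ms', s) := aInner ms ds
      (m2 :: ms', m2 + s)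
  | ms, _ => (ms, 0)

-- the outer while loop; 'results.append(0)' followed by the accumulating for loop is ported
-- as appending the accumulated total directly; fuel as above (at most 33 iterations on Pre_)
def aWhile (fuel : Nat) (n : Int) (digitStack multiply results : List Int) : List Int :=
  match fuel with
  | 0 => results
  | f + 1 =>
    if results.isEmpty || results.getLastD 0 < n then
      let (multiply2, add) := aInner multiply digitStack
      aWhile f n digitStack multiply2 (results ++ [add])
    else results

def splitMulList (n : Int) : List Int × List Int :=
  let r := aDigitLoop 64 n 0 true [] []
  let sum := r.1
  let binary := r.2.1
  let digitStack := r.2.2.1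
  let multiply := r.2.2.2
  if !binary then
    let results := aWhile 64 n digitStack multiply [sum]
    let results := if results.getLastD 0 > n then results.dropLast else results
    (digitStack, results)
  else (digitStack, [-1])

-- ===== PORT B =====
-- Source B's _digits recursion, with fuel (one unit per digit; never exhausted on Pre_)
def bDigits (fuel : Nat) (num : Int) : List Int :=
  match fuel with
  | 0 => []
  | f + 1 =>
    if num = 0 then []
    else PySem.Int.mod num 10 :: bDigits f (PySem.Int.floordiv num 10)

-- Source B's while True loop; fuel as above
def bLoop (fuel : Nat) (n : Int) (digits : List Int) (j : Nat) (results : List Int) : List Int :=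
  match fuel with
  | 0 => results
  | f + 1 =>
    let s := (digits.map (fun d => d ^ j)).sum
    if s > n then results
    else if s = n then results ++ [s]
    else bLoop f n digits (j + 1) (results ++ [s])

def splitMulList_alt (n : Int) : List Int × List Int :=
  let digits := bDigits 64 n
  if digits.all (fun d => d ≤ 1) then (digits, [-1])
  else (digits, bLoop 64 n digits 1 [])

-- ===== PRECONDITION & SPEC =====
-- For n < 0, 'num //= 10' never reaches 0 (it stalls at -1), so Python A loops forever; those
-- inputs are excluded.
def Pre_splitMulList (n : Int) : Prop := 0 ≤ n
instance (n : Int) : Decidable (Pre_splitMulList n) := by unfold Pre_splitMulList; infer_instance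
def pvWitness_splitMulList : Int := 27231

def Spec_splitMulList (n : Int) (out : List Int × List Int) : Prop := out = splitMulList_alt n
instance (n : Int) (out : List Int × List Int) : Decidable (Spec_splitMulList n out) := by unfold Spec_splitMulList; infer_instance

-- ===== CLAIM (what is proved, stated in full; the proofs are below) =====
def Claim_equal_splitMulList : Prop := ∀ (n : Int), Dom_splitMulList n → Pre_splitMulList n → Spec_splitMulList n (splitMulList n)

-- ===== LEMMAS AND PROOFS =====

def powsum (digits : List Int) (j : Nat) : Int := (digits.map (fun d => d ^ j)).sum

-- one-step unfolding lemmas (rw-controlled; simp [bLoop] would unfold recursively)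
theorem bLoop_succ (f : Nat) (n : Int) (digits : List Int) (j : Nat) (r : List Int) :
    bLoop (f + 1) n digits j r =
      (if powsum digits j > n then r
       else if powsum digits j = n then r ++ [powsum digits j]
       else bLoop f n digits (j + 1) (r ++ [powsum digits j])) := rfl

theorem aWhile_succ (f : Nat) (n : Int) (ds m r : List Int) :
    aWhile (f + 1) n ds m r =
      (if r.isEmpty || r.getLastD 0 < n then
        aWhile f n ds (aInner m ds).1 (r ++ [(aInner m ds).2])
       else r) := by
  show (if r.isEmpty || r.getLastD 0 < n then
          let p := aInner m ds
          aWhile f n ds p.1 (r ++ [p.2])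
        else r) = _
  rfl

theorem bLoop_acc (f : Nat) (n : Int) (digits : List Int) (j : Nat) (r : List Int) :
    bLoop f n digits j r = r ++ bLoop f n digits j [] := by
  induction f generalizing j r with
  | zero => simp [bLoop]
  | succ f ih =>
    rw [bLoop_succ, bLoop_succ f n digits j []]
    split_ifs with h1 h2
    · simp
    · simp
    · rw [ih (j+1) (r ++ _), ih (j+1) ([] ++ _)]; simp

theorem digits_bound (f : Nat) (num : Int) : ∀ d ∈ bDigits f num, 0 ≤ d ∧ d ≤ 9 := by
  induction f generalizing num with
  | zero => simp [bDigits]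
  | succ f ih =>
    intro d hd
    simp only [bDigits] at hd
    split_ifs at hd with h
    · simp at hd
    · rcases List.mem_cons.mp hd with h' | h'
      · subst h'
        constructor
        · exact PySem.Int.mod_nonneg num (by norm_num)
        · have := PySem.Int.mod_lt num (b := 10) (by norm_num); omega
      · exact ih _ d h'

theorem aDigitLoop_succ (f : Nat) (num sum : Int) (b : Bool) (ds ms : List Int) :
    aDigitLoop (f + 1) num sum b ds ms =
      (if num ≠ 0 then
        aDigitLoop f (PySem.Int.floordiv num 10) (sum + PySem.Int.mod num 10)
          (if PySem.Int.mod num 10 ≠ 0 ∧ PySem.Int.mod num 10 ≠ 1 then false else b)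
          (ds ++ [PySem.Int.mod num 10]) (ms ++ [PySem.Int.mod num 10])
       else (sum, b, ds, ms)) := rfl

theorem aDigitLoop_eq (f : Nat) (num sum : Int) (b : Bool) (ds ms : List Int) :
    aDigitLoop f num sum b ds ms =
      (sum + (bDigits f num).sum,
       b && (bDigits f num).all (fun d => decide (d = 0) || decide (d = 1)),
       ds ++ bDigits f num, ms ++ bDigits f num) := by
  induction f generalizing num sum b ds ms with
  | zero => simp [aDigitLoop, bDigits]
  | succ f ih =>
    by_cases h : num = 0
    · simp [aDigitLoop, bDigits, h]
    · rw [aDigitLoop_succ, if_pos (h : num ≠ 0)]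
      rw [show bDigits (f + 1) num = PySem.Int.mod num 10 :: bDigits f (PySem.Int.floordiv num 10)
            from by rw [bDigits]; exact if_neg h]
      set d := PySem.Int.mod num 10 with hd
      rw [ih]
      simp only [List.sum_cons, List.all_cons, List.append_assoc, List.singleton_append,
        Prod.mk.injEq]
      refine ⟨by ring, ?_, trivial⟩
      by_cases h0 : d = 0
      · simp [h0]
      · by_cases h1 : d = 1
        · simp [h1]
        · simp [h0, h1]

theorem aInner_pow (digits : List Int) (j : Nat) :
    aInner (digits.map (fun d => d ^ j)) digits =
      (digits.map (fun d => d ^ (j + 1)), powsum digits (j + 1)) := by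
  induction digits with
  | nil => simp [aInner, powsum]
  | cons d ds ih =>
    simp only [List.map_cons, aInner, ih, powsum, List.sum_cons]
    simp [pow_succ]

theorem powsum_nonneg (digits : List Int) (j : Nat) (h : ∀ d ∈ digits, 0 ≤ d) :
    0 ≤ powsum digits j := by
  induction digits with
  | nil => simp [powsum]
  | cons d ds ih =>
    simp only [powsum, List.map_cons, List.sum_cons]
    have h1 : (0:Int) ≤ d ^ j := pow_nonneg (h d (by simp)) j
    have h2 := ih (fun d hd => h d (by simp [hd]))
    simp only [powsum] at h2
    omega

theorem powsum_ge_pow (digits : List Int) (j : Nat)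
    (h0 : ∀ d ∈ digits, 0 ≤ d) (h2 : ∃ d ∈ digits, 2 ≤ d) :
    (2:Int) ^ j ≤ powsum digits j := by
  induction digits with
  | nil => simp at h2
  | cons d ds ih =>
    simp only [powsum, List.map_cons, List.sum_cons]
    by_cases hd : 2 ≤ d
    · have hdj : (2:Int) ^ j ≤ d ^ j := pow_le_pow_left₀ (by norm_num) hd j
      have hs := powsum_nonneg ds j (fun d hd => h0 d (by simp [hd]))
      simp only [powsum] at hs
      omega
    · rcases h2 with ⟨e, he, he2⟩
      have hed : e ∈ ds := by
        rcases List.mem_cons.mp he with h | h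
        · omega
        · exact h
      have := ih (fun d hd => h0 d (by simp [hd])) ⟨e, hed, he2⟩
      simp only [powsum] at this
      have hdj : (0:Int) ≤ d ^ j := pow_nonneg (h0 d (by simp)) j
      omega

theorem bLoop_stable (n : Int) (digits : List Int) :
    ∀ (f j f' : Nat), n ≤ powsum digits (j + f) → f + 1 ≤ f' →
      bLoop f' n digits j [] = bLoop (f + 1) n digits j [] := by
  intro f
  induction f with
  | zero =>
    intro j f' hs hf
    obtain ⟨f'', rfl⟩ : ∃ f'', f' = f'' + 1 := ⟨f' - 1, by omega⟩
    rw [bLoop_succ, bLoop_succ]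
    simp only [Nat.add_zero] at hs
    split_ifs with h1 h2
    · rfl
    · rfl
    · omega
  | succ f ih =>
    intro j f' hs hf
    obtain ⟨f'', rfl⟩ : ∃ f'', f' = f'' + 1 := ⟨f' - 1, by omega⟩
    rw [bLoop_succ, bLoop_succ]
    split_ifs with h1 h2
    · rfl
    · rfl
    · rw [bLoop_acc, bLoop_acc (f + 1)]
      have hs' : n ≤ powsum digits (j + 1 + f) := by
        have e : j + 1 + f = j + (f + 1) := by omega
        rw [e]; exact hs
      rw [ih (j + 1) f'' hs' (by omega)]

def popIf (n : Int) (r : List Int) : List Int := if r.getLastD 0 > n then r.dropLast else r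

theorem main_loop (n : Int) (digits : List Int) :
    ∀ (fA : Nat) (j : Nat) (R : List Int),
    n ≤ powsum digits (j + fA) →
    popIf n (aWhile fA n digits (digits.map (fun d => d ^ j)) (R ++ [powsum digits j])) =
      R ++ bLoop (fA + 1) n digits j [] := by
  intro fA
  induction fA with
  | zero =>
    intro j R hs
    simp only [Nat.add_zero] at hs
    show popIf n (R ++ [powsum digits j]) = _
    rw [bLoop_succ]
    unfold popIf
    simp only [List.getLastD_concat, List.dropLast_concat]
    split_ifs with h1 h2
    · simp
    · simp
    · omega
  | succ fA ih =>
    intro j R hs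
    rw [aWhile_succ]
    have hne : (R ++ [powsum digits j]).isEmpty = false := by simp
    have hlast : (R ++ [powsum digits j]).getLastD 0 = powsum digits j := by
      simp
    rw [hne, hlast]
    simp only [Bool.false_or]
    by_cases hlt : powsum digits j < n
    · rw [if_pos (by exact decide_eq_true hlt), aInner_pow]
      rw [show (R ++ [powsum digits j]) ++ [powsum digits (j + 1)] =
            (R ++ [powsum digits j]) ++ [powsum digits (j + 1)] from rfl]
      have hs' : n ≤ powsum digits (j + 1 + fA) := by
        have e : j + 1 + fA = j + (fA + 1) := by omega
        rw [e]; exact hs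
      rw [ih (j + 1) (R ++ [powsum digits j]) hs']
      rw [bLoop_succ (fA + 1)]
      rw [if_neg (by omega), if_neg (by omega)]
      rw [bLoop_acc (fA + 1) n digits (j + 1) ([] ++ [powsum digits j])]
      simp
    · rw [if_neg (by simpa using hlt)]
      rw [bLoop_succ]
      unfold popIf
      simp only [List.getLastD_concat, List.dropLast_concat]
      split_ifs with h1 h2
      · simp
      · simp
      · omega

-- ===== VERDICT (by name: the statement is the Claim_ definition above) =====
theorem splitMulList_spec : Claim_equal_splitMulList := by
  intro n hdom hpre
  unfold Spec_splitMulList splitMulList splitMulList_alt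
  rw [aDigitLoop_eq]
  simp only [List.nil_append, zero_add, Bool.true_and]
  set digits := bDigits 64 n with hdig
  have hb : ∀ d ∈ digits, 0 ≤ d ∧ d ≤ 9 := digits_bound 64 n
  by_cases hbin : digits.all (fun d => d ≤ 1)
  · -- all digits ≤ 1: both return (digits, [-1])
    have hflag : (digits.all fun d => decide (d = 0) || decide (d = 1)) = true := by
      simp only [List.all_eq_true] at *
      intro d hd
      have h1 := hbin d hd
      have h2 := (hb d hd).1
      simp at *
      omega
    simp [hflag, hbin]
  · have hflag : (digits.all fun d => decide (d = 0) || decide (d = 1)) = false := by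
      rw [Bool.eq_false_iff]
      intro hall
      apply hbin
      rw [List.all_eq_true] at hall ⊢
      intro d hd
      have h1 := hall d hd
      have h2 := (hb d hd).1
      simp at h1 ⊢
      omega
    rw [hflag, Bool.not_false, if_pos rfl, if_neg hbin]
    simp only [Prod.mk.injEq, true_and]
    have h2 : ∃ d ∈ digits, 2 ≤ d := by
      simp only [List.all_eq_true, not_forall] at hbin
      rcases hbin with ⟨d, hd, hdle⟩
      exact ⟨d, hd, by have := (hb d hd).1; simp at hdle; omega⟩
    have h0 : ∀ d ∈ digits, 0 ≤ d := fun d hd => (hb d hd).1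
    have hn : n ≤ 2147483648 := by
      unfold Dom_splitMulList pvDomInt at hdom
      simp at hdom
      omega
    have hs33 : n ≤ powsum digits 33 := by
      have := powsum_ge_pow digits 33 h0 h2
      have h2p : (2147483648:Int) ≤ 2 ^ 33 := by norm_num
      omega
    have hsuffA : n ≤ powsum digits (1 + 64) := by
      rw [show (1:Nat) + 64 = 65 from by norm_num]
      have := powsum_ge_pow digits 65 h0 h2
      have h2p : (2147483648:Int) ≤ 2 ^ 65 := by norm_num
      omega
    have hmain := main_loop n digits 64 1 [] hsuffA
    rw [show digits.map (fun d => d ^ (1:Nat)) = digits from by simp] at hmain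
    simp only [List.nil_append] at hmain
    rw [bLoop_stable n digits 32 1 (64 + 1) (by simpa using hs33) (by omega)] at hmain
    rw [bLoop_stable n digits 32 1 64 (by simpa using hs33) (by omega)]
    have hsum : powsum digits 1 = digits.sum := by simp [powsum]
    rw [← hsum]
    unfold popIf at hmain
    exact hmain
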